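-- pv_equiv track=rewrite | github.com/Revi1337/BaekJoon-Coding-Test | 백준/Gold/2195. 문자열 복사/문자열 복사.py | solution
-- ===== SOURCE A (Python) =====
-- def solution(S, P):
--     slen, plen, ans = len(S), len(P), 0
--     sidx = 0
--     while sidx < plen:
--         idxes = [idx for idx in range(slen) if S[idx] == P[sidx]]
--         mxs = []
--         for pidx in idxes:
--             cnt = 0
--             for nidx in range(sidx, plen):
--                 if pidx + nidx - sidx >= slen:
--                     break
--                 if P[nidx] == S[pidx + nidx - sidx]:
--                     cnt += 1
--                 else:
--                     break
--             if cnt: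
--                 mxs.append(cnt)
--         sidx += max(mxs)
--         ans += 1
--
--     return ans
-- ===== SOURCE B (Python) =====
-- def solution(S, P):
--     # Greedy: at each position take the longest prefix of the rest of P that
--     # occurs as a substring of S, found by an incremental C-level substring test.
--     n = len(P)
--     ans = 0
--     i = 0
--     while i < n:
--         l = 1
--         while i + l < n and P[i:i+l+1] in S:
--             l += 1
--         i += l
--         ans += 1
--     return ans
-- ===== Notes on version B (the rewrite author's own statement) =====
-- stated objective: faster
-- what changed: Instead of scanning S for every occurrence of P[i] and char-matching from each occurrence, B climbs the match length with an incremental substring-membership test 'P[i:i+l+1] in S' (C-level search), then jumps greedily.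
import Mathlib
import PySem

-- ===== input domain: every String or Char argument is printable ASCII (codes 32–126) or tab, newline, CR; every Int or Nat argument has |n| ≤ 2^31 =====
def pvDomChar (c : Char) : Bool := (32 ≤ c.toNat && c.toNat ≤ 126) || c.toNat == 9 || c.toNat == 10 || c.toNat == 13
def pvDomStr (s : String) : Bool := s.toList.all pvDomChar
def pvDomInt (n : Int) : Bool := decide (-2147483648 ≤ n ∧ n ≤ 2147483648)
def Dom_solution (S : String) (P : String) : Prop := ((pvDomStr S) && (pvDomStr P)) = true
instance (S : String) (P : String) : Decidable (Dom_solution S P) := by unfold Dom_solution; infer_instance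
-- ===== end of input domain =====

-- B replaces A's per-step search (matching character by character at every occurrence of
-- P[sidx] in S) by an incremental substring-membership test; equal return values on Pre_.

-- ===== PORT A =====
-- inner 'for nidx in range(sidx, plen)' with its two breaks; '1 + …' is Python's 'cnt += 1' before continuing
def pvACnt (Sl Pl : List Char) (slen sidx pidx : Int) : List Int → Int
  | [] => 0
  | nidx :: rest =>
    if slen ≤ pidx + nidx - sidx then 0
    else if PySem.List.pyGetD Pl nidx ' ' = PySem.List.pyGetD Sl (pidx + nidx - sidx) ' '
    then 1 + pvACnt Sl Pl slen sidx pidx rest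
    else 0

-- 'while sidx < plen' as fuel recursion; fuel plen+1 suffices since each step adds max(mxs) ≥ 1;
-- the 'none' branch is exactly where Python's max([]) raises ValueError (excluded by Pre_)
def pvALoop (Sl Pl : List Char) (slen plen : Int) : Nat → Int → Int → Int
  | 0, _, ans => ans
  | fuel + 1, sidx, ans =>
    if sidx < plen then
      let idxes := (PySem.List.pyRange 0 slen 1).filter
        (fun idx => PySem.List.pyGetD Sl idx ' ' == PySem.List.pyGetD Pl sidx ' ')
      let mxs := (idxes.map
        (fun pidx => pvACnt Sl Pl slen sidx pidx (PySem.List.pyRange sidx plen 1))).filter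
        (fun c => c ≠ 0)
      match PySem.List.max? mxs (fun x => x) with
      | some m => pvALoop Sl Pl slen plen fuel (sidx + m) (ans + 1)
      | none => ans
    else ans

def solution (S : String) (P : String) : Int :=
  pvALoop S.toList P.toList S.toList.length P.toList.length (P.toList.length + 1) 0 0

-- ===== PORT B =====
-- 'while i + l < n and P[i:i+l+1] in S: l += 1'; fuel n suffices since l stays below n - i
def pvBClimb (Sl Pl : List Char) (n i : Nat) : Nat → Nat → Nat
  | 0, l => l
  | fuel + 1, l =>
    if i + l < n ∧ PySem.Chars.isIn (PySem.List.slice Pl (some (i : Int)) (some ((i : Int) + (l : Int) + 1))) Sl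
    then pvBClimb Sl Pl n i fuel (l + 1)
    else l

-- 'while i < n: … i += l; ans += 1'; fuel n+1 suffices since each step adds l ≥ 1
def pvBLoop (Sl Pl : List Char) (n : Nat) : Nat → Nat → Int → Int
  | 0, _, ans => ans
  | fuel + 1, i, ans =>
    if i < n then pvBLoop Sl Pl n fuel (i + pvBClimb Sl Pl n i n 1) (ans + 1) else ans

def solution_alt (S : String) (P : String) : Int :=
  pvBLoop S.toList P.toList P.toList.length (P.toList.length + 1) 0 0

-- ===== PRECONDITION & SPEC =====
-- Pre_ excludes exactly the inputs on which A raises: when some character of P never occurs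
-- in S, the greedy scan reaches it and max([]) raises ValueError.
def Pre_solution (S : String) (P : String) : Prop := (P.toList.all (fun c => S.toList.contains c)) = true
instance (S : String) (P : String) : Decidable (Pre_solution S P) := by unfold Pre_solution; infer_instance
def pvWitness_solution : String × String := ("aba", "abab")

def Spec_solution (S : String) (P : String) (out : Int) : Prop := out = solution_alt S P
instance (S : String) (P : String) (out : Int) : Decidable (Spec_solution S P out) := by unfold Spec_solution; infer_instance

-- ===== CLAIM (what is proved, stated in full; the proofs are below) =====
def Claim_equal_solution : Prop := ∀ (S : String) (P : String), Dom_solution S P → Pre_solution S P → Spec_solution S P (solution S P)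

-- ===== LEMMAS AND PROOFS =====

-- longest-common-prefix length: the value of A's inner cnt loop
def pvLcp : List Char → List Char → Nat
  | a :: as, b :: bs => if a = b then pvLcp as bs + 1 else 0
  | _, _ => 0

theorem pvLcp_nil_left (b : List Char) : pvLcp [] b = 0 := by cases b <;> rfl

theorem pvLcp_nil_right (a : List Char) : pvLcp a [] = 0 := by cases a <;> rfl

theorem pvLcp_le_left (a : List Char) : ∀ b, pvLcp a b ≤ a.length := by
  induction a with
  | nil => intro b; simp [pvLcp_nil_left]
  | cons x as ih =>
    intro b
    cases b with
    | nil => simp [pvLcp_nil_right]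
    | cons y bs =>
      by_cases h : x = y
      · simpa [pvLcp, h] using Nat.succ_le_succ (ih bs)
      · simp [pvLcp, h]

theorem pvLcp_take_eq (a : List Char) : ∀ b, a.take (pvLcp a b) = b.take (pvLcp a b) := by
  induction a with
  | nil => intro b; simp [pvLcp_nil_left]
  | cons x as ih =>
    intro b
    cases b with
    | nil => simp [pvLcp_nil_right]
    | cons y bs =>
      by_cases h : x = y
      · subst h; simp [pvLcp, List.take_succ_cons, ih bs]
      · simp [pvLcp, h]

theorem le_pvLcp_of_take_eq (a : List Char) :
    ∀ (b : List Char) (l : Nat), l ≤ a.length → a.take l = b.take l → l ≤ pvLcp a b := by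
  induction a with
  | nil =>
    intro b l hl _
    have : l = 0 := Nat.le_zero.mp (by simpa using hl)
    simp [this]
  | cons x as ih =>
    intro b l hl ht
    cases l with
    | zero => exact Nat.zero_le _
    | succ l' =>
      cases b with
      | nil => simp [List.take_succ_cons] at ht
      | cons y bs =>
        simp only [List.take_succ_cons, List.cons.injEq] at ht
        obtain ⟨hxy, ht'⟩ := ht
        subst hxy
        have hrec := ih bs l' (by simpa using Nat.le_of_succ_le_succ hl) ht'
        have e : pvLcp (x :: as) (x :: bs) = pvLcp as bs + 1 := by simp [pvLcp]
        omega

-- A's cnt loop from position s, started at sidx with occurrence pidx, computes the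
-- common-prefix length of P[s:] and S[pidx+s-sidx:]
theorem pvACnt_eq (Sl Pl : List Char) (sidx pidx : Int) :
    ∀ (k s : Nat), Pl.length - s ≤ k → sidx ≤ (s : Int) → 0 ≤ pidx + s - sidx →
      pvACnt Sl Pl Sl.length sidx pidx (PySem.List.pyRange s Pl.length 1)
        = (pvLcp (Pl.drop s) (Sl.drop (pidx + s - sidx).toNat) : Int) := by
  intro k
  induction k with
  | zero =>
    intro s hk _ _
    have hs : Pl.length ≤ s := by omega
    rw [PySem.List.pyRange_one_eq_nil (by exact_mod_cast hs)]
    simp [pvACnt, List.drop_eq_nil_of_le hs, pvLcp_nil_left]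
  | succ k ih =>
    intro s hk h1 h2
    by_cases hs : Pl.length ≤ s
    · rw [PySem.List.pyRange_one_eq_nil (by exact_mod_cast hs)]
      simp [pvACnt, List.drop_eq_nil_of_le hs, pvLcp_nil_left]
    · have hs' : s < Pl.length := Nat.lt_of_not_le hs
      rw [PySem.List.pyRange_one_cons (by exact_mod_cast hs')]
      simp only [pvACnt]
      have hq : pidx + (s : Int) - sidx = (((pidx + (s : Int) - sidx).toNat : Nat) : Int) := by omega
      set q : Nat := (pidx + (s : Int) - sidx).toNat with hqdef
      by_cases hqs : Sl.length ≤ q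
      · rw [if_pos (by rw [hq]; exact_mod_cast hqs)]
        simp [List.drop_eq_nil_of_le hqs, pvLcp_nil_right]
      · have hq' : q < Sl.length := Nat.lt_of_not_le hqs
        rw [if_neg (by rw [hq]; exact_mod_cast hqs)]
        rw [hq, PySem.List.pyGetD_ofNat Pl s ' ' hs', PySem.List.pyGetD_ofNat Sl q ' ' hq']
        rw [List.drop_eq_getElem_cons hs', List.drop_eq_getElem_cons hq']
        by_cases hc : Pl[s] = Sl[q]
        · rw [if_pos hc]
          have ecast : ((s : Int) + 1) = (((s + 1 : Nat) : Nat) : Int) := by push_cast; ring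
          rw [ecast]
          have ihh := ih (s + 1) (by omega) (by push_cast; omega) (by omega)
          have etoNat : (pidx + ((s + 1 : Nat) : Int) - sidx).toNat = q + 1 := by push_cast; omega
          rw [etoNat] at ihh
          rw [ihh]
          simp [pvLcp, hc]
          ring
        · rw [if_neg hc]
          simp [pvLcp, hc]

-- B's climb returns the largest feasible step length
theorem pvBClimb_spec (Sl Pl : List Char) (i : Nat) :
    ∀ (fuel l : Nat), 1 ≤ l → i + l ≤ Pl.length → ((Pl.drop i).take l <:+: Sl) →
      Pl.length ≤ fuel + (i + l) →
      (1 ≤ pvBClimb Sl Pl Pl.length i fuel l ∧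
       i + pvBClimb Sl Pl Pl.length i fuel l ≤ Pl.length ∧
       ((Pl.drop i).take (pvBClimb Sl Pl Pl.length i fuel l) <:+: Sl) ∧
       (i + pvBClimb Sl Pl Pl.length i fuel l = Pl.length ∨
        ¬ ((Pl.drop i).take (pvBClimb Sl Pl Pl.length i fuel l + 1) <:+: Sl))) := by
  intro fuel
  induction fuel with
  | zero =>
    intro l h1 h2 h3 hf
    simp only [pvBClimb]
    exact ⟨h1, h2, h3, Or.inl (by omega)⟩
  | succ fuel ih =>
    intro l h1 h2 h3 hf
    simp only [pvBClimb]
    have hslice : PySem.List.slice Pl (some (i : Int)) (some ((i : Int) + (l : Int) + 1))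
        = (Pl.drop i).take (l + 1) := by
      have e : ((i : Int) + (l : Int) + 1) = (i : Int) + ((l + 1 : Nat) : Int) := by push_cast; ring
      rw [e]
      exact PySem.List.slice_natCast_add Pl i (l + 1)
    by_cases hC : i + l < Pl.length ∧ PySem.Chars.isIn
        (PySem.List.slice Pl (some (i : Int)) (some ((i : Int) + (l : Int) + 1))) Sl = true
    · rw [if_pos hC]
      refine ih (l + 1) (by omega) (by omega) ?_ (by omega)
      rw [← hslice]
      exact (PySem.Chars.isIn_iff_infix _ _).mp hC.2
    · rw [if_neg hC]
      refine ⟨h1, h2, h3, ?_⟩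
      by_cases hn : i + l = Pl.length
      · exact Or.inl hn
      · refine Or.inr fun hinf => hC ⟨by omega, ?_⟩
        rw [hslice]
        exact (PySem.Chars.isIn_iff_infix _ _).mpr hinf

-- A's cnt at a Nat occurrence, as used below
theorem pvACnt_at (Sl Pl : List Char) (i q : Nat) :
    pvACnt Sl Pl Sl.length (i : Int) (q : Int) (PySem.List.pyRange (i : Int) Pl.length 1)
      = (pvLcp (Pl.drop i) (Sl.drop q) : Int) := by
  have h := pvACnt_eq Sl Pl (i : Int) (q : Int) (Pl.length - i) i le_rfl le_rfl (by omega)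
  have e : ((q : Int) + (i : Int) - (i : Int)).toNat = q := by omega
  rw [e] at h
  exact h

-- the per-step lengths of A and B agree
theorem pvStep_eq (Sl Pl : List Char) (i : Nat) (hi : i < Pl.length) (hmem : Pl[i] ∈ Sl) :
    PySem.List.max?
      ((((PySem.List.pyRange 0 Sl.length 1).filter
        (fun idx => PySem.List.pyGetD Sl idx ' ' == PySem.List.pyGetD Pl (i : Int) ' ')).map
        (fun pidx => pvACnt Sl Pl Sl.length (i : Int) pidx (PySem.List.pyRange (i : Int) Pl.length 1))).filter
        (fun c => c ≠ 0)) (fun x => x)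
      = some ((pvBClimb Sl Pl Pl.length i Pl.length 1 : Nat) : Int) := by
  set p : List Char := Pl.drop i with hp
  set K : Nat := pvBClimb Sl Pl Pl.length i Pl.length 1 with hKdef
  -- the climb's starting state is feasible: P[i:i+1] = [P[i]] occurs in S
  have hgood1 : p.take 1 <:+: Sl := by
    obtain ⟨u, v, huv⟩ := List.mem_iff_append.mp hmem
    rw [hp, List.drop_eq_getElem_cons hi, List.take_succ_cons, List.take_zero]
    exact ⟨u, v, by rw [huv]; simp⟩
  obtain ⟨hK1, hK2, hKinf, hKmax⟩ :=
    pvBClimb_spec Sl Pl i Pl.length 1 le_rfl (by omega) hgood1 (by omega)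
  rw [← hKdef] at hK1 hK2 hKinf hKmax
  -- (a) every element of mxs is at most K
  have hub : ∀ c ∈ ((((PySem.List.pyRange 0 Sl.length 1).filter
        (fun idx => PySem.List.pyGetD Sl idx ' ' == PySem.List.pyGetD Pl (i : Int) ' ')).map
        (fun pidx => pvACnt Sl Pl Sl.length (i : Int) pidx (PySem.List.pyRange (i : Int) Pl.length 1))).filter
        (fun c => c ≠ 0)), c ≤ (K : Int) := by
    intro c hc
    rw [List.mem_filter] at hc
    obtain ⟨hcm, _⟩ := hc
    rw [List.mem_map] at hcm
    obtain ⟨pidx, hpm, rfl⟩ := hcm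
    rw [List.mem_filter] at hpm
    obtain ⟨hpr, _⟩ := hpm
    rw [PySem.List.mem_pyRange_one] at hpr
    have hqcast : pidx = ((pidx.toNat : Nat) : Int) := by omega
    rw [hqcast, pvACnt_at]
    set q : Nat := pidx.toNat
    set L : Nat := pvLcp p (Sl.drop q) with hL
    have hLlen : L ≤ p.length := pvLcp_le_left p (Sl.drop q)
    have hplen : p.length = Pl.length - i := by rw [hp, List.length_drop]
    have hLK : L ≤ K := by
      by_contra hgt
      rw [not_le] at hgt
      have hnot : ¬ (p.take (K + 1) <:+: Sl) := hKmax.resolve_left (by omega)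
      apply hnot
      have hinfL : p.take L <:+: Sl := by
        rw [pvLcp_take_eq p (Sl.drop q)]
        exact (List.take_prefix _ _).isInfix.trans (List.drop_suffix _ _).isInfix
      have hpre : p.take (K + 1) <+: p.take L := by
        have e : p.take (K + 1) = (p.take L).take (K + 1) := by
          rw [List.take_take]
          congr 1
          omega
        rw [e]
        exact List.take_prefix _ _
      exact hpre.isInfix.trans hinfL
    exact_mod_cast hLK
  -- (b) some element of mxs is at least K: take the occurrence of P[i:i+K] in S
  obtain ⟨t, u, hS⟩ := hKinf
  have htakelen : (p.take K).length = K := by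
    rw [List.length_take, hp, List.length_drop]
    omega
  have hq0 : t.length < Sl.length := by
    have e : (t ++ p.take K ++ u).length = Sl.length := by rw [hS]
    simp only [List.length_append] at e
    omega
  have hdropq0 : Sl.drop t.length = p.take K ++ u := by
    rw [← hS, List.append_assoc, List.drop_left]
  obtain ⟨K0, hK0⟩ : ∃ K0, K = K0 + 1 := ⟨K - 1, by omega⟩
  obtain ⟨c, p', hpc⟩ : ∃ c p', p = c :: p' := by
    cases hp' : p with
    | nil =>
      exfalso
      have hlp := congrArg List.length hp'
      rw [hp, List.length_drop] at hlp
      simp at hlp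
      omega
    | cons c p' => exact ⟨c, p', rfl⟩
  have hgetP : PySem.List.pyGetD Pl (i : Int) ' ' = c := by
    rw [PySem.List.pyGetD_ofNat Pl i ' ' hi]
    have e := List.drop_eq_getElem_cons hi
    rw [← hp, hpc] at e
    injection e with h1 _
    exact h1.symm
  have hgetS : PySem.List.pyGetD Sl ((t.length : Nat) : Int) ' ' = c := by
    rw [PySem.List.pyGetD_ofNat Sl t.length ' ' hq0]
    have e := List.drop_eq_getElem_cons hq0
    rw [hdropq0, hpc, hK0, List.take_succ_cons] at e
    injection e with h1 _
    exact h1.symm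
  have hLcpK : K ≤ pvLcp p (Sl.drop t.length) := by
    apply le_pvLcp_of_take_eq
    · rw [hp, List.length_drop]; omega
    · rw [hdropq0, List.take_append_of_le_length (by omega)]
      rw [List.take_take, Nat.min_self]
  -- membership of that occurrence's cnt in mxs
  have hpidxmem : ((t.length : Nat) : Int) ∈ (PySem.List.pyRange 0 Sl.length 1).filter
      (fun idx => PySem.List.pyGetD Sl idx ' ' == PySem.List.pyGetD Pl (i : Int) ' ') := by
    rw [List.mem_filter]
    refine ⟨?_, ?_⟩
    · rw [PySem.List.mem_pyRange_one]
      constructor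
      · positivity
      · exact_mod_cast hq0
    · rw [hgetS, hgetP]
      simp
  have hcinm : ((pvLcp p (Sl.drop t.length) : Nat) : Int) ∈ ((((PySem.List.pyRange 0 Sl.length 1).filter
        (fun idx => PySem.List.pyGetD Sl idx ' ' == PySem.List.pyGetD Pl (i : Int) ' ')).map
        (fun pidx => pvACnt Sl Pl Sl.length (i : Int) pidx (PySem.List.pyRange (i : Int) Pl.length 1))).filter
        (fun c => c ≠ 0)) := by
    rw [List.mem_filter]
    refine ⟨List.mem_map.mpr ⟨((t.length : Nat) : Int), hpidxmem, pvACnt_at Sl Pl i t.length⟩, ?_⟩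
    have hpos : pvLcp p (Sl.drop t.length) ≠ 0 := by
      have := le_trans hK1 hLcpK
      omega
    simpa using hpos
  -- conclude: the max of mxs is exactly K
  cases hmx : PySem.List.max? ((((PySem.List.pyRange 0 Sl.length 1).filter
        (fun idx => PySem.List.pyGetD Sl idx ' ' == PySem.List.pyGetD Pl (i : Int) ' ')).map
        (fun pidx => pvACnt Sl Pl Sl.length (i : Int) pidx (PySem.List.pyRange (i : Int) Pl.length 1))).filter
        (fun c => c ≠ 0)) (fun x => x) with
  | none =>
    rw [PySem.List.max?_eq_none_iff] at hmx
    rw [hmx] at hcinm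
    simp at hcinm
  | some m =>
    have hm1 := PySem.List.max?_mem hmx
    have hub_m : m ≤ (K : Int) := hub m hm1
    have hlb : (K : Int) ≤ m := by
      have h1 : ((pvLcp p (Sl.drop t.length) : Nat) : Int) ≤ m := PySem.List.max?_isMax hmx _ hcinm
      have h2 : (K : Int) ≤ ((pvLcp p (Sl.drop t.length) : Nat) : Int) := by exact_mod_cast hLcpK
      exact le_trans h2 h1
    rw [le_antisymm hub_m hlb]

theorem pvLoop_eq (Sl Pl : List Char) (hpre : ∀ c ∈ Pl, c ∈ Sl) :
    ∀ (fuel : Nat) (i : Nat) (ans : Int),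
      pvALoop Sl Pl Sl.length Pl.length fuel (i : Int) ans = pvBLoop Sl Pl Pl.length fuel i ans := by
  intro fuel
  induction fuel with
  | zero => intro i ans; rfl
  | succ fuel ih =>
    intro i ans
    simp only [pvALoop, pvBLoop]
    by_cases hi : i < Pl.length
    · rw [if_pos (show ((i : Nat) : Int) < ((Pl.length : Nat) : Int) by exact_mod_cast hi), if_pos hi]
      have hmem : Pl[i] ∈ Sl := hpre _ (List.getElem_mem hi)
      have hstep := pvStep_eq Sl Pl i hi hmem
      split
      · rename_i m hm
        rw [hm] at hstep
        have hmK : m = ((pvBClimb Sl Pl Pl.length i Pl.length 1 : Nat) : Int) := by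
          exact Option.some_inj.mp hstep
        rw [hmK]
        have e : ((i : Int) + ((pvBClimb Sl Pl Pl.length i Pl.length 1 : Nat) : Int))
            = (((i + pvBClimb Sl Pl Pl.length i Pl.length 1 : Nat) : Nat) : Int) := by push_cast; ring
        rw [e]
        exact ih (i + pvBClimb Sl Pl Pl.length i Pl.length 1) (ans + 1)
      · rename_i hm
        rw [hm] at hstep
        cases hstep
    · rw [if_neg (show ¬ ((i : Nat) : Int) < ((Pl.length : Nat) : Int) by exact_mod_cast hi), if_neg hi]

-- ===== VERDICT (by name: the statement is the Claim_ definition above) =====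
theorem solution_spec : Claim_equal_solution := by
  intro S P _ hpre
  unfold Spec_solution solution solution_alt
  refine pvLoop_eq S.toList P.toList ?_ (P.toList.length + 1) 0 0
  intro c hc
  have hp' : (P.toList.all (fun c => S.toList.contains c)) = true := hpre
  have h2 := List.all_eq_true.mp hp' c hc
  simpa using h2
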